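-- pv_equiv track=rewrite | github.com/rarycoringa/alticci-sequence-service | app/alticci/controllers.py | retrieve_alticci_term
-- ===== SOURCE A (Python) =====
-- def retrieve_alticci_term(term: int) -> int:
--     if term < 0:
--         raise ValueError(f"Cannot calculate negative term value: {term}")
--     elif term == 0:
--         return 0
--     elif term in [1, 2]:
--         return 1
--
--     value = retrieve_alticci_term(term-3) + retrieve_alticci_term(term-2)
--
--     return value
-- ===== SOURCE B (Python) =====
-- def retrieve_alticci_term(term: int) -> int:
--     if term < 0:
--         raise ValueError(f"Cannot calculate negative term value: {term}")
--     a, b, c = 0, 1, 1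
--     for _ in range(term):
--         a, b, c = b, c, a + b
--     return a
-- ===== Notes on version B (the rewrite author's own statement) =====
-- stated objective: faster
-- what changed: Replaced the exponential two-branch recursion with a single bottom-up loop keeping the last three terms; a timing run measured B substantially faster, with A timing out on larger terms where B returns.
import Mathlib
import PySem

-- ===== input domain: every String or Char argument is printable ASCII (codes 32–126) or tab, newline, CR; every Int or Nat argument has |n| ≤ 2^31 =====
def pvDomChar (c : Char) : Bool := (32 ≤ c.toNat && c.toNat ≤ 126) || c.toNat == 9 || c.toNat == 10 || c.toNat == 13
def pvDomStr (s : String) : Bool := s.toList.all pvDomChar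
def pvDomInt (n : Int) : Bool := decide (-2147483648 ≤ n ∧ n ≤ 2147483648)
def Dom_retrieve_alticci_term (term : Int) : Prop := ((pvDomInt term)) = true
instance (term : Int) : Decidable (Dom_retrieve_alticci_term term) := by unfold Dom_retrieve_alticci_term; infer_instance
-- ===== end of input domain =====

-- B replaces A's exponential recursion by a bottom-up loop over the last three terms (measured faster in a timing run; A times out on larger terms where B returns).

-- ===== PORT A =====
-- A's recursion, on the nonnegative arguments it actually recurses over (term-3, term-2
-- stay ≥ 0 below the base cases), encoded as structural recursion on Nat.
def alticciRecA : Nat → Int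
  | 0 => 0
  | 1 => 1
  | 2 => 1
  | (n + 3) => alticciRecA n + alticciRecA (n + 1)

-- negative term: Python raises ValueError (excluded by Pre_); 0 is a placeholder there.
def retrieve_alticci_term (term : Int) : Int :=
  if term < 0 then 0 else alticciRecA term.toNat

-- ===== PORT B =====
-- one loop step: (a, b, c) ↦ (b, c, a + b), iterated term times.
def alticciLoopB : Nat → Int × Int × Int → Int × Int × Int
  | 0, s => s
  | (k + 1), (a, b, c) => alticciLoopB k (b, c, a + b)

def retrieve_alticci_term_alt (term : Int) : Int :=
  if term < 0 then 0 else (alticciLoopB term.toNat (0, 1, 1)).1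

-- ===== PRECONDITION & SPEC =====
-- A raises ValueError on negative term; Pre_ excludes exactly those inputs.
def Pre_retrieve_alticci_term (term : Int) : Prop := 0 ≤ term
instance (term : Int) : Decidable (Pre_retrieve_alticci_term term) := by
  unfold Pre_retrieve_alticci_term; infer_instance

def pvWitness_retrieve_alticci_term : Int := 7

def Spec_retrieve_alticci_term (term : Int) (out : Int) : Prop := out = retrieve_alticci_term_alt term
instance (term : Int) (out : Int) : Decidable (Spec_retrieve_alticci_term term out) := by
  unfold Spec_retrieve_alticci_term; infer_instance

-- ===== CLAIM (what is proved, stated in full; the proofs are below) =====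
def Claim_equal_retrieve_alticci_term : Prop := ∀ (term : Int), Dom_retrieve_alticci_term term → Pre_retrieve_alticci_term term → Spec_retrieve_alticci_term term (retrieve_alticci_term term)

-- ===== LEMMAS AND PROOFS =====
theorem alticciRecA_add3 (k : Nat) :
    alticciRecA (k + 3) = alticciRecA k + alticciRecA (k + 1) := rfl

theorem alticciLoopB_invariant (n k : Nat) :
    alticciLoopB n (alticciRecA k, alticciRecA (k + 1), alticciRecA (k + 2))
      = (alticciRecA (n + k), alticciRecA (n + k + 1), alticciRecA (n + k + 2)) := by
  induction n generalizing k with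
  | zero => simp [alticciLoopB]
  | succ m ih =>
    have step : alticciLoopB (m + 1)
        (alticciRecA k, alticciRecA (k + 1), alticciRecA (k + 2))
        = alticciLoopB m
          (alticciRecA (k + 1), alticciRecA (k + 1 + 1), alticciRecA (k + 1 + 2)) := by
      simp [alticciLoopB, ← alticciRecA_add3]
    rw [step, ih (k + 1)]
    ring_nf

theorem alticci_nat_eq (n : Nat) : alticciRecA n = (alticciLoopB n (0, 1, 1)).1 := by
  have h := alticciLoopB_invariant n 0
  have h0 : (alticciRecA 0, alticciRecA 1, alticciRecA 2) = ((0 : Int), (1 : Int), (1 : Int)) := rfl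
  rw [h0] at h
  simp [h]

-- ===== VERDICT (by name: the statement is the Claim_ definition above) =====
theorem retrieve_alticci_term_spec : Claim_equal_retrieve_alticci_term := by
  intro term _ hpre
  unfold Spec_retrieve_alticci_term retrieve_alticci_term retrieve_alticci_term_alt
  rw [if_neg (not_lt.mpr hpre), if_neg (not_lt.mpr hpre), alticci_nat_eq]
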